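-- pv_equiv track=rewrite | github.com/Tmas-V/Master_Thesis_Taltech_2024 | client/utils.py | generate_from_payloads
-- ===== SOURCE A (Python) =====
-- def generate_from_payloads(payloads):
--     if len(payloads) == 1:
--         return payloads[0]
--     if len(payloads) == 2:
--         ret = []
--         for i in range(0, len(payloads[0])):
--             for j in range(0, len(payloads[1])):
--                 delim = " "
--                 if payloads[0][i] == "" or payloads[1][j] == "":
--                     delim = ""
--                 ret += [payloads[0][i] + delim + payloads[1][j]]
--         return ret
--     else:
--         ret = generate_from_payloads([payloads[len(payloads)-2], payloads[len(payloads)-1]])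
--         for i in reversed(range(0, len(payloads)-2)):
--             ret = generate_from_payloads([payloads[i], ret])
--         return ret
-- ===== SOURCE B (Python) =====
-- def generate_from_payloads(payloads):
--     combos = [()]
--     for lst in payloads:
--         combos = [c + (x,) for c in combos for x in lst]
--     return [" ".join(x for x in c if x != "") for c in combos]
-- ===== Notes on version B (the rewrite author's own statement) =====
-- stated objective: simpler
-- what changed: replaces A's recursive pairwise combination with empty-string delimiter propagation (special-cased lengths 1/2 plus a reversed-index loop of recursive calls) by one left-fold Cartesian-product pass followed by joining the non-empty components of each combination with a single space
import Mathlib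
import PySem

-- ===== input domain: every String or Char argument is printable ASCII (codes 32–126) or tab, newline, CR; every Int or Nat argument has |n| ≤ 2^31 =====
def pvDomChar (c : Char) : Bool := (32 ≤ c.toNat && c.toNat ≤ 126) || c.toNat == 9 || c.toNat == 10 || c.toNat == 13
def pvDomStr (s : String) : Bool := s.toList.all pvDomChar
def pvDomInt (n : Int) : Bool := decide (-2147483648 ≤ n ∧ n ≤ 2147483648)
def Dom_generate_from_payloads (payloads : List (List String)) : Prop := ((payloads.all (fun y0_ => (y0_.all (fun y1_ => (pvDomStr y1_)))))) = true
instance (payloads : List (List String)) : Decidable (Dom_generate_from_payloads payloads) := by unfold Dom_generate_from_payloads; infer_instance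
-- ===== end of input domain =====

-- B replaces A's pairwise right-to-left recursive concatenation (empty-string delimiter
-- propagation) with a single Cartesian-product pass that joins the non-empty components of
-- each combination with one space: a simpler, non-recursive decomposition of the same task.


-- ===== PORT A =====
-- A's len==2 branch: the nested loop over payloads[0], payloads[1]. A's recursive calls
-- generate_from_payloads([x, ret]) always pass a 2-element list and therefore execute exactly
-- this branch, so they are ported as calls to this helper (needed for Lean termination).
def gfp_pair (p0 p1 : List String) : List String :=
  p0.foldl (fun ret a =>
    p1.foldl (fun ret b =>
      ret ++ [a ++ (if a = "" ∨ b = "" then "" else " ") ++ b]) ret) []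

-- A's 'for i in reversed(range(0, len(payloads)-2)): ret = generate_from_payloads([payloads[i], ret])'
def gfp_loop (pay : List (List String)) : List Nat → List String → List String
  | [], ret => ret
  | i :: is, ret => gfp_loop pay is (gfp_pair (pay.getD i []) ret)

def generate_from_payloads (payloads : List (List String)) : List String :=
  if payloads.length = 1 then payloads.getD 0 []
  else if payloads.length = 2 then
    gfp_pair (payloads.getD 0 []) (payloads.getD 1 [])
  else
    gfp_loop payloads ((List.range (payloads.length - 2)).reverse)
      (gfp_pair (payloads.getD (payloads.length - 2) []) (payloads.getD (payloads.length - 1) []))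

-- ===== PORT B =====
def generate_from_payloads_alt (payloads : List (List String)) : List String :=
  let combos : List (List String) :=
    payloads.foldl (fun combos lst => combos.flatMap (fun c => lst.map (fun x => c ++ [x]))) [[]]
  combos.map (fun c => PySem.Str.join " " (c.filter (fun x => x ≠ "")))

-- ===== PRECONDITION & SPEC =====
-- Pre_ excludes only the empty list of payload lists, on which the Python A raises IndexError
-- (it reads payloads[-2]); B would return [""] there.
def Pre_generate_from_payloads (payloads : List (List String)) : Prop := payloads ≠ []
instance (payloads : List (List String)) : Decidable (Pre_generate_from_payloads payloads) := by unfold Pre_generate_from_payloads; infer_instance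
def pvWitness_generate_from_payloads : List (List String) := [["a", ""], ["b c"]]

def Spec_generate_from_payloads (payloads : List (List String)) (out : List String) : Prop := out = generate_from_payloads_alt payloads
instance (payloads : List (List String)) (out : List String) : Decidable (Spec_generate_from_payloads payloads out) := by unfold Spec_generate_from_payloads; infer_instance

-- ===== CLAIM (what is proved, stated in full; the proofs are below) =====
def Claim_equal_generate_from_payloads : Prop := ∀ (payloads : List (List String)), Dom_generate_from_payloads payloads → Pre_generate_from_payloads payloads → Spec_generate_from_payloads payloads (generate_from_payloads payloads)
-- ===== LEMMAS AND PROOFS =====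

-- proof-side vocabulary
def comb (a b : String) : String := a ++ (if a = "" ∨ b = "" then "" else " ") ++ b
def JS (c : List String) : String := PySem.Str.join " " (c.filter (fun x => x ≠ ""))
def prodR (ls : List (List String)) : List (List String) :=
  ls.foldr (fun l acc => l.flatMap (fun a => acc.map (a :: ·))) [[]]
def S (ls : List (List String)) : List String := (prodR ls).map JS

lemma str_ne_empty_iff (s : String) : s ≠ "" ↔ s.toList ≠ [] := by
  constructor <;> intro h hc
  · exact h (String.toList_inj.mp (by simpa using hc))
  · subst hc; simp at h

lemma gfp_pair_eq (p0 p1 : List String) :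
    gfp_pair p0 p1 = p0.flatMap (fun a => p1.map (comb a)) := by
  unfold gfp_pair
  rw [PySem.List.foldl_congr_mem p0 _ (fun ret a => ret ++ p1.map (comb a)) []
    (by
      intro acc a _
      simpa [comb] using PySem.List.foldl_append_singleton_eq_map (fun b => comb a b) p1 acc)]
  simpa using PySem.List.foldl_append_eq_flatMap (fun a => p1.map (comb a)) p0 []

lemma JS_singleton (a : String) : JS [a] = a := by
  apply String.toList_inj.mp
  by_cases h : a = ""
  · subst h; simp [JS, PySem.Str.toList_join, PySem.Chars.join_nil]
  · simp [JS, h, PySem.Str.toList_join, PySem.Chars.join_singleton]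

lemma join_cons_ne_nil (sep : List Char) (p : List Char) (rest : List (List Char))
    (hp : p ≠ []) : PySem.Chars.join sep (p :: rest) ≠ [] := by
  cases rest with
  | nil => simpa [PySem.Chars.join_singleton]
  | cons q t => simp [PySem.Chars.join_cons_cons, hp]

lemma comb_JS (a : String) (c : List String) : comb a (JS c) = JS (a :: c) := by
  by_cases ha : a = ""
  · subst ha
    apply String.toList_inj.mp
    simp [comb, JS]
  · have hpos : (fun x : String => decide (x ≠ "")) a = true := by simp [ha]
    cases hc : c.filter (fun x => x ≠ "") with
    | nil =>
      have hJc : JS c = "" := by unfold JS; rw [hc]; rfl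
      have hstep : List.filter (fun x => decide (x ≠ "")) (a :: c)
          = a :: List.filter (fun x => decide (x ≠ "")) c := by
        rw [List.filter_cons]; simp [ha]
      have hJac : JS (a :: c) = PySem.Str.join " " [a] := by
        unfold JS; rw [hstep, hc]
      rw [hJc, hJac]
      apply String.toList_inj.mp
      simp [comb, PySem.Str.toList_join, PySem.Chars.join_singleton]
    | cons b t =>
      have hb : b ≠ "" := by
        have := List.of_mem_filter (a := b) (l := c) (by rw [hc]; exact List.mem_cons_self ..)
        simpa using this
      have hJc : JS c = PySem.Str.join " " (b :: t) := by unfold JS; rw [hc]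
      have hstep : List.filter (fun x => decide (x ≠ "")) (a :: c)
          = a :: List.filter (fun x => decide (x ≠ "")) c := by
        rw [List.filter_cons]; simp [ha]
      have hJac : JS (a :: c) = PySem.Str.join " " (a :: b :: t) := by
        unfold JS; rw [hstep, hc]
      have hJne : JS c ≠ "" := by
        rw [str_ne_empty_iff, hJc]
        simp only [PySem.Str.toList_join, List.map_cons]
        exact join_cons_ne_nil _ _ _ ((str_ne_empty_iff b).mp hb)
      rw [hJac, hJc]
      apply String.toList_inj.mp
      have hcond : (a = "" ∨ PySem.Str.join " " (b :: t) = "") = False := by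
        simp [ha, hJc ▸ hJne]
      simp only [comb, hcond, if_false, String.toList_append, PySem.Str.toList_join,
        List.map_cons, PySem.Chars.join_cons_cons, List.append_assoc]

lemma S_cons (x : List String) (ls : List (List String)) :
    gfp_pair x (S ls) = S (x :: ls) := by
  rw [gfp_pair_eq]
  show x.flatMap (fun a => ((prodR ls).map JS).map (comb a))
      = (x.flatMap (fun a => (prodR ls).map (a :: ·))).map JS
  rw [List.map_flatMap]
  apply List.flatMap_congr
  intro a _
  rw [List.map_map, List.map_map]
  apply List.map_congr_left
  intro t _
  exact comb_JS a t

lemma S_single (x : List String) : S [x] = x := by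
  simp only [S, prodR, List.foldr_cons, List.foldr_nil]
  have : x.flatMap (fun a => ([[]] : List (List String)).map (a :: ·)) = x.map (fun a => [a]) := by
    simp only [List.map_cons, List.map_nil]
    exact Eq.symm List.map_eq_flatMap
  rw [this, List.map_map]
  conv_rhs => rw [← List.map_id x]
  apply List.map_congr_left
  intro a _
  simpa using JS_singleton a

lemma foldr_S (front : List (List String)) (rest : List (List String)) :
    front.foldr gfp_pair (S rest) = S (front ++ rest) := by
  induction front with
  | nil => simp
  | cons x xs ih => simp only [List.foldr_cons, ih, List.cons_append]; exact S_cons x (xs ++ rest)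

lemma alt_eq_S (payloads : List (List String)) :
    generate_from_payloads_alt payloads = S payloads := by
  unfold generate_from_payloads_alt
  have key : ∀ (ls : List (List String)) (init : List (List String)),
      ls.foldl (fun combos lst => combos.flatMap (fun c => lst.map (fun x => c ++ [x]))) init
        = init.flatMap (fun c => (prodR ls).map (fun t => c ++ t)) := by
    intro ls
    induction ls with
    | nil => intro init; simp [prodR]
    | cons l ls ih =>
      intro init
      rw [List.foldl_cons, ih, List.flatMap_assoc]
      show init.flatMap (fun c => (l.map (fun x => c ++ [x])).flatMap (fun y => (prodR ls).map (fun t => y ++ t)))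
          = init.flatMap (fun c => ((l.flatMap (fun a => (prodR ls).map (a :: ·)))).map (fun t => c ++ t))
      apply List.flatMap_congr
      intro c _
      rw [List.flatMap_map, List.map_flatMap]
      apply List.flatMap_congr
      intro a _
      rw [List.map_map]
      apply List.map_congr_left
      intro t _
      exact (List.append_cons c a t).symm
  rw [key]
  simp only [S]
  have : ([([] : List String)]).flatMap (fun c => (prodR payloads).map (fun t => c ++ t))
      = prodR payloads := by simp
  rw [this]
  rfl

lemma gfp_loop_take (pay : List (List String)) (k : Nat) (hk : k + 2 ≤ pay.length)
    (ret : List String) :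
    gfp_loop pay ((List.range k).reverse) ret = (pay.take k).foldr gfp_pair ret := by
  induction k generalizing ret with
  | zero => simp [gfp_loop]
  | succ k ih =>
    have hk' : k + 2 ≤ pay.length := by omega
    have hlt : k < pay.length := by omega
    rw [List.range_succ, List.reverse_append]
    simp only [List.reverse_singleton, List.singleton_append, gfp_loop]
    rw [ih hk']
    have : pay.take (k + 1) = pay.take k ++ [pay[k]] := by
      rw [List.take_add_one]; simp [hlt]
    rw [this, List.foldr_append]
    simp only [List.foldr_cons, List.foldr_nil]
    congr 2
    simp [List.getD_eq_getElem?_getD, hlt]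

lemma drop_pred2 (pay : List (List String)) (h : 3 ≤ pay.length) :
    pay.drop (pay.length - 2)
      = [pay.getD (pay.length - 2) [], pay.getD (pay.length - 1) []] := by
  apply List.ext_getElem
  · simp; omega
  · intro i h1 h2
    have hi : i < 2 := by simpa using h2
    have e1 : pay.length - 2 < pay.length := by omega
    have e2 : pay.length - 1 < pay.length := by omega
    have e3 : pay.length - 2 + 1 = pay.length - 1 := by omega
    interval_cases i <;>
      simp [List.getElem_drop, List.getD_eq_getElem?_getD, e1, e2, e3]

-- ===== VERDICT (by name: the statement is the Claim_ definition above) =====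
theorem generate_from_payloads_spec : Claim_equal_generate_from_payloads := by
  intro payloads _ hpre
  unfold Spec_generate_from_payloads
  rw [alt_eq_S]
  unfold generate_from_payloads
  by_cases h1 : payloads.length = 1
  · rw [if_pos h1]
    match payloads, h1 with
    | [x], _ => simp [S_single]
  · rw [if_neg h1]
    by_cases h2 : payloads.length = 2
    · rw [if_pos h2]
      match payloads, h2 with
      | [x, y], _ =>
        show gfp_pair x y = S [x, y]
        rw [← S_cons, S_single]
    · rw [if_neg h2]
      have h3 : 3 ≤ payloads.length := by
        rcases payloads with _ | ⟨x, _ | ⟨y, _ | ⟨z, t⟩⟩⟩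
        · exact absurd rfl hpre
        · exact absurd rfl h1
        · exact absurd rfl h2
        · simp
      rw [gfp_loop_take payloads (payloads.length - 2) (by omega)]
      have hpair : gfp_pair (payloads.getD (payloads.length - 2) [])
          (payloads.getD (payloads.length - 1) []) = S (payloads.drop (payloads.length - 2)) := by
        rw [drop_pred2 payloads h3, ← S_cons, S_single]
      rw [hpair, foldr_S, List.take_append_drop]
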